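-- pv_equiv track=rewrite | github.com/dinhcongpham/codeforce | 10-2024/B.py | solve
-- ===== SOURCE A (Python) =====
-- def solve(s):
--     num_1 = num_0 = 0
--     for i in range(len(s)):
--         if s[i] == '1':
--             num_1 += 1
--         else:
--             num_0 += 1
--     for i in range(len(s)):
--         if s[i] == '1':
--             if num_0 == 0:
--                 return len(s) - i
--             num_0 -= 1
--         if s[i] == '0':
--             if num_1 == 0:
--                 return len(s) - i
--             num_1 -= 1
--
--     return 0
-- ===== SOURCE B (Python) =====
-- def _nth_index(s, ch, k):
--     """0-based index of occurrence number k (counting from 0) of ch in s, or None."""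
--     for i, c in enumerate(s):
--         if c == ch:
--             if k == 0:
--                 return i
--             k -= 1
--     return None
--
--
-- def solve(s):
--     n = len(s)
--     c1 = s.count('1')
--     p1 = _nth_index(s, '1', n - c1)   # where the '1'-branch counter would run out
--     p0 = _nth_index(s, '0', c1)       # where the '0'-branch counter would run out
--     cands = [p for p in (p1, p0) if p is not None]
--     return n - min(cands) if cands else 0
-- ===== Notes on version B (the rewrite author's own statement) =====
-- stated objective: alternative
-- what changed: Replaces the simultaneous dual-counter co-scan with a counts-first pass (c1 = number of one-characters via str.count, num0 = len(s) - c1) followed by two targeted single-character occurrence searches (the occurrence at which each counter would run out), returning len(s) minus the earlier trigger index, or 0 if neither exists.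
import Mathlib
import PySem

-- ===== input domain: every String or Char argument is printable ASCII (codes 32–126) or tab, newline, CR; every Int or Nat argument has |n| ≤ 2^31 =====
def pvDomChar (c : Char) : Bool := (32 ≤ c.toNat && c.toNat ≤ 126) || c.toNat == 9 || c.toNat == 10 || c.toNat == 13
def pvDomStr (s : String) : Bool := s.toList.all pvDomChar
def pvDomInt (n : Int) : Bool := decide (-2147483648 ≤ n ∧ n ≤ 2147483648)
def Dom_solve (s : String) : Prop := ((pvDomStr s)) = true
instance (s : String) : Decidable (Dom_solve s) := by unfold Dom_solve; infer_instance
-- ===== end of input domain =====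

-- B replaces A's simultaneous dual-counter co-scan by a counts-first pass plus two
-- targeted searches for a specific occurrence index (objective: alternative decomposition).

-- ===== PORT A =====
-- second loop of A: scan with both counters; 'len(s) - i' is the length of the unscanned suffix (incl. current char)
def solveLoop : List Char → Int → Int → Int
  | [], _, _ => 0
  | c :: rest, num1, num0 =>
    if c = '1' then
      if num0 = 0 then ((rest.length : Int) + 1)
      else solveLoop rest num1 (num0 - 1)
    else if c = '0' then
      if num1 = 0 then ((rest.length : Int) + 1)
      else solveLoop rest (num1 - 1) num0
    else solveLoop rest num1 num0

def solve (s : String) : Int :=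
  let l := s.toList
  -- first loop: count '1's and non-'1's
  let p := l.foldl (fun (p : Int × Int) c => if c = '1' then (p.1 + 1, p.2) else (p.1, p.2 + 1)) (0, 0)
  solveLoop l p.1 p.2

-- ===== PORT B =====
-- _nth_index: 0-based index of occurrence number k of ch, scanning with enumerate
def nthIndex : List Char → Char → Int → Int → Option Int
  | [], _, _, _ => none
  | c :: rest, ch, k, i =>
    if c = ch then
      if k = 0 then some i else nthIndex rest ch (k - 1) (i + 1)
    else nthIndex rest ch k (i + 1)

def solve_alt (s : String) : Int :=
  let l := s.toList
  let n : Int := l.length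
  let c1 : Int := l.count '1'
  let p1 := nthIndex l '1' (n - c1) 0
  let p0 := nthIndex l '0' c1 0
  let cands := [p1, p0].filterMap id
  match PySem.List.min? cands (fun x => x) with
  | some m => n - m
  | none => 0

-- ===== PRECONDITION & SPEC =====
def Spec_solve (s : String) (out : Int) : Prop := out = solve_alt s
instance (s : String) (out : Int) : Decidable (Spec_solve s out) := by unfold Spec_solve; infer_instance

-- ===== CLAIM (what is proved, stated in full; the proofs are below) =====
def Claim_equal_solve : Prop := ∀ (s : String), Dom_solve s → Spec_solve s (solve s)

-- ===== LEMMAS AND PROOFS =====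

-- combine the two candidate trigger positions the way solve_alt does
def combine (n : Int) : Option Int → Option Int → Int
  | none, none => 0
  | some p, none => n - p
  | none, some p => n - p
  | some a, some b => n - min a b

lemma nthIndex_shift (l : List Char) (ch : Char) (k i : Int) :
    nthIndex l ch k (i + 1) = (nthIndex l ch k i).map (· + 1) := by
  induction l generalizing k i with
  | nil => simp [nthIndex]
  | cons c rest ih => simp only [nthIndex]; split_ifs <;> simp [ih]

lemma nthIndex_nonneg (l : List Char) (ch : Char) (k i x : Int)
    (h : nthIndex l ch k i = some x) : i ≤ x := by
  induction l generalizing k i with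
  | nil => simp [nthIndex] at h
  | cons c rest ih =>
    simp only [nthIndex] at h
    split_ifs at h with h1 h2
    · injection h with h; omega
    · exact le_trans (by omega) (ih _ _ h)
    · exact le_trans (by omega) (ih _ _ h)

lemma solveLoop_eq_combine (l : List Char) (n1 n0 : Int) :
    solveLoop l n1 n0 = combine l.length (nthIndex l '1' n0 0) (nthIndex l '0' n1 0) := by
  induction l generalizing n1 n0 with
  | nil => simp [solveLoop, nthIndex, combine]
  | cons c rest ih =>
    have sh : ∀ ch k, nthIndex rest ch k 1 = (nthIndex rest ch k 0).map (· + 1) := by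
      intro ch k
      have h := nthIndex_shift rest ch k 0
      norm_num at h
      exact h
    by_cases h1 : c = '1'
    · subst h1
      simp only [solveLoop, nthIndex, List.length_cons, zero_add, if_true,
                 if_neg (by decide : ¬ ('1' : Char) = '0')]
      rw [sh, sh]
      by_cases h2 : n0 = 0
      · subst h2
        simp only [if_pos rfl]
        rcases hB : nthIndex rest '0' n1 0 with _ | b
        · simp [combine, hB]
        · have hb := nthIndex_nonneg rest '0' n1 0 b hB
          simp only [hB, combine, Option.map_some]
          push_cast; omega
      · simp only [if_neg h2]
        rw [ih]
        rcases hA : nthIndex rest '1' (n0 - 1) 0 with _ | a <;>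
          rcases hB : nthIndex rest '0' n1 0 with _ | b <;>
            simp only [hA, hB, combine, Option.map_some, Option.map_none] <;> push_cast <;> omega
    · by_cases h3 : c = '0'
      · subst h3
        simp only [solveLoop, nthIndex, List.length_cons, zero_add, if_true,
                   if_neg (by decide : ¬ ('0' : Char) = '1')]
        rw [sh, sh]
        by_cases h4 : n1 = 0
        · subst h4
          simp only [if_pos rfl]
          rcases hA : nthIndex rest '1' n0 0 with _ | a
          · simp [combine, hA]
          · have ha := nthIndex_nonneg rest '1' n0 0 a hA
            simp only [combine, Option.map_some]
            push_cast; omega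
        · simp only [if_neg h4]
          rw [ih]
          rcases hA : nthIndex rest '1' n0 0 with _ | a <;>
            rcases hB : nthIndex rest '0' (n1 - 1) 0 with _ | b <;>
              simp only [hA, hB, combine, Option.map_some, Option.map_none] <;> push_cast <;> omega
      · simp only [solveLoop, nthIndex, List.length_cons, zero_add, if_neg h1, if_neg h3]
        rw [sh, sh, ih]
        rcases hA : nthIndex rest '1' n0 0 with _ | a <;>
          rcases hB : nthIndex rest '0' n1 0 with _ | b <;>
            simp only [hA, hB, combine, Option.map_some, Option.map_none] <;> push_cast <;> omega

lemma fold_counts (l : List Char) (a b : Int) :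
    l.foldl (fun (p : Int × Int) c => if c = '1' then (p.1 + 1, p.2) else (p.1, p.2 + 1)) (a, b)
      = (a + l.count '1', b + (l.countP (fun c => !(c = '1')) : Int)) := by
  induction l generalizing a b with
  | nil => simp
  | cons c rest ih =>
    by_cases h : c = '1' <;> simp [h, ih] <;> push_cast <;> ring

lemma countP_not_one (l : List Char) :
    (l.countP (fun c => !(c = '1')) : Int) = (l.length : Int) - l.count '1' := by
  induction l with
  | nil => simp
  | cons c t ih =>
    by_cases h : c = '1' <;>
      simp [List.countP_cons, List.count_cons, h] <;> push_cast <;> omega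

lemma solve_alt_eq_combine (s : String) :
    solve_alt s = combine s.toList.length
      (nthIndex s.toList '1' ((s.toList.length : Int) - s.toList.count '1') 0)
      (nthIndex s.toList '0' (s.toList.count '1') 0) := by
  simp only [solve_alt]
  generalize nthIndex s.toList '1' ((s.toList.length : Int) - s.toList.count '1') 0 = p1
  generalize nthIndex s.toList '0' ((s.toList.count '1' : Int)) 0 = p0
  rcases p1 with _ | a <;> rcases p0 with _ | b <;>
    simp [combine, PySem.List.min?, min_def] <;> split_ifs <;> simp <;> omega

-- ===== VERDICT (by name: the statement is the Claim_ definition above) =====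
theorem solve_spec : Claim_equal_solve := by
  intro s _
  unfold Spec_solve
  simp only [solve]
  rw [fold_counts, solve_alt_eq_combine, solveLoop_eq_combine]
  simp only [countP_not_one, zero_add]
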